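-- pv_equiv track=rewrite | github.com/jordan-carlson99/google_foobar_challenge2022 | google foobar challenge 2 (part 1).py | solution
-- ===== SOURCE A (Python) =====
-- def solution(s):
--     list_length = len(s)
--     s = list(s)
--     right_loc = []
--     left_loc = []
--     y = 0
--
--     # Find location of < and > put location on a list for comparing
--     for i in range(list_length):
--         try:
--             right = s[i:i+1].index('>')
--             right_loc.append((right + i))
--         except ValueError:
--             pass
--         try:
--             left = s[i:i+1].index('<')
--             left_loc.append((left + i))
--         except ValueError:
--             pass
--
--     left_loc_l = len(left_loc)
--     right_loc_l = len(right_loc)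
--
--     # Compare every value in left_loc against every value in right_loc, compare to see if they will 'pass' each other
--     for t in range(left_loc_l):
--         for x in range(right_loc_l):
--             if left_loc[t] > right_loc[x]:
--                 y += 2
--             elif left_loc[t] < right_loc[x]:
--                 pass
--             else:
--                 break
--
--     return y
-- ===== SOURCE B (Python) =====
-- def solution(s):
--     # Single pass: count '>' seen so far; each '<' passes all of them, 2 per pass.
--     gt = 0
--     y = 0
--     for c in s:
--         if c == '>':
--             gt += 1
--         elif c == '<':
--             y += 2 * gt
--     return y
-- ===== Notes on version B (the rewrite author's own statement) =====
-- stated objective: faster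
-- what changed: Replaced the position-list construction plus nested all-pairs comparison with a single left-to-right pass that counts '>' seen so far and adds 2 per '<'.
import Mathlib
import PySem

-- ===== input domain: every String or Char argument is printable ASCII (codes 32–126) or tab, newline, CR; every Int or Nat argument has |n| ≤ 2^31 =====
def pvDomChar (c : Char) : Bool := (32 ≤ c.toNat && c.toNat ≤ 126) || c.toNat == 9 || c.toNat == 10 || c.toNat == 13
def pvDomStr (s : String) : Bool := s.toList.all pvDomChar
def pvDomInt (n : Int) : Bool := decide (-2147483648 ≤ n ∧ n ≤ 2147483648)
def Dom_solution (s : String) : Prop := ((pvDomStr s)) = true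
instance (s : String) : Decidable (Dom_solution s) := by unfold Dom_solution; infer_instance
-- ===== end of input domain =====

-- B replaces A's position lists + nested all-pairs loop by one O(n) pass counting '>' so far (objective: faster).

-- ===== PORT A =====
-- one iteration of the first range loop of A: s[i:i+1].index('>') / .index('<') with try/except
def scanStep (sl : List Char) (st : List Int × List Int) (i : Int) : List Int × List Int :=
  let st1 :=
    match PySem.List.index? (PySem.List.slice sl (some i) (some (i + 1))) '>' with
    | some r => (st.1 ++ [(r : Int) + i], st.2)
    | none => st
  match PySem.List.index? (PySem.List.slice sl (some i) (some (i + 1))) '<' with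
  | some l => (st1.1, st1.2 ++ [(l : Int) + i])
  | none => st1

-- the first range loop: collect (right_loc, left_loc)
def solutionScan (sl : List Char) : List Int × List Int :=
  (PySem.List.pyRange 0 (sl.length : Int) 1).foldl (scanStep sl) ([], [])

-- the inner 'for x in range(right_loc_l)' loop, with its break on equality
def solutionInner (l : Int) (rights : List Int) (y : Int) : Int :=
  match rights with
  | [] => y
  | r :: rs =>
    if l > r then solutionInner l rs (y + 2)
    else if l < r then solutionInner l rs y
    else y

def solution (s : String) : Int :=
  let sl := s.toList
  let rl := solutionScan sl
  rl.2.foldl (fun y l => solutionInner l rl.1 y) 0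

-- ===== PORT B =====
def solution_alt (s : String) : Int :=
  (s.toList.foldl
    (fun (st : Int × Int) c =>
      if c = '>' then (st.1 + 1, st.2)
      else if c = '<' then (st.1, st.2 + 2 * st.1)
      else st) (0, 0)).2

-- ===== PRECONDITION & SPEC =====
def Spec_solution (s : String) (out : Int) : Prop := out = solution_alt s
instance (s : String) (out : Int) : Decidable (Spec_solution s out) := by unfold Spec_solution; infer_instance

-- ===== CLAIM (what is proved, stated in full; the proofs are below) =====
def Claim_equal_solution : Prop := ∀ (s : String), Dom_solution s → Spec_solution s (solution s)

-- ===== LEMMAS AND PROOFS =====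

-- B's fold state
def altFold (sl : List Char) : Int × Int :=
  sl.foldl
    (fun (st : Int × Int) c =>
      if c = '>' then (st.1 + 1, st.2)
      else if c = '<' then (st.1, st.2 + 2 * st.1)
      else st) (0, 0)

lemma slice_append_lt {sl : List Char} {c : Char} {i : Int} (h0 : 0 ≤ i)
    (h : i < (sl.length : Int)) :
    PySem.List.slice (sl ++ [c]) (some i) (some (i + 1)) =
      PySem.List.slice sl (some i) (some (i + 1)) := by
  rw [PySem.List.slice_toNat (sl ++ [c]) h0 (by omega),
      PySem.List.slice_toNat sl h0 (by omega)]
  have hi : i.toNat < sl.length := by omega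
  rw [List.drop_append_of_le_length (by omega)]
  have h1 : (i + 1).toNat - i.toNat = 1 := by omega
  rw [h1]
  have hne : sl.drop i.toNat ≠ [] := by
    simp [List.drop_eq_nil_iff]; omega
  cases hd : sl.drop i.toNat with
  | nil => exact absurd hd hne
  | cons a t => simp

lemma slice_append_self (sl : List Char) (c : Char) :
    PySem.List.slice (sl ++ [c]) (some (sl.length : Int)) (some ((sl.length : Int) + 1)) = [c] := by
  rw [PySem.List.slice_toNat (sl ++ [c]) (by positivity) (by positivity)]
  have h1 : ((sl.length : Int) + 1).toNat - ((sl.length : Int)).toNat = 1 := by omega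
  have h2 : ((sl.length : Int)).toNat = sl.length := by omega
  rw [h1, h2, List.drop_append_of_le_length (le_refl _)]
  simp

lemma scanStep_snoc_last (sl : List Char) (c : Char) (st : List Int × List Int) :
    scanStep (sl ++ [c]) st (sl.length : Int) =
      (st.1 ++ (if c = '>' then [(sl.length : Int)] else []),
       st.2 ++ (if c = '<' then [(sl.length : Int)] else [])) := by
  unfold scanStep
  rw [slice_append_self]
  by_cases hgt : c = '>'
  · subst hgt
    simp [PySem.List.index?]
  · by_cases hlt : c = '<'
    · subst hlt
      simp [PySem.List.index?]
    · simp [PySem.List.index?, hgt, hlt]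

lemma solutionScan_snoc (sl : List Char) (c : Char) :
    solutionScan (sl ++ [c]) =
      ((solutionScan sl).1 ++ (if c = '>' then [(sl.length : Int)] else []),
       (solutionScan sl).2 ++ (if c = '<' then [(sl.length : Int)] else [])) := by
  unfold solutionScan
  have hlen : ((sl ++ [c]).length : Int) = (sl.length : Int) + 1 := by simp
  rw [hlen, PySem.List.pyRange_one_succ_right (by positivity), List.foldl_append]
  rw [PySem.List.foldl_congr_mem (PySem.List.pyRange 0 (sl.length : Int) 1)
        (scanStep (sl ++ [c])) (scanStep sl) ([], [])
        (by
          intro acc x hx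
          rw [PySem.List.mem_pyRange_one] at hx
          unfold scanStep
          rw [slice_append_lt hx.1 hx.2])]
  simp only [List.foldl_cons, List.foldl_nil]
  rw [scanStep_snoc_last]

lemma solutionInner_append_gt (l r : Int) (rs : List Int) (y : Int) (h : l < r) :
    solutionInner l (rs ++ [r]) y = solutionInner l rs y := by
  induction rs generalizing y with
  | nil => simp [solutionInner, not_lt.mpr (le_of_lt h), h]
  | cons a t ih =>
    simp only [List.cons_append, solutionInner]
    split_ifs <;> simp [ih]

lemma solutionInner_all_lt (l : Int) (rs : List Int) (y : Int) (h : ∀ r ∈ rs, r < l) :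
    solutionInner l rs y = y + 2 * rs.length := by
  induction rs generalizing y with
  | nil => simp [solutionInner]
  | cons a t ih =>
    have ha : a < l := h a (by simp)
    simp only [solutionInner, ha, if_pos]
    rw [ih _ (fun r hr => h r (by simp [hr]))]
    simp only [List.length_cons]
    push_cast
    ring

-- the main invariant, by snoc induction
lemma scan_invariant (sl : List Char) :
    (∀ x ∈ (solutionScan sl).1, x < (sl.length : Int)) ∧
    (∀ x ∈ (solutionScan sl).2, x < (sl.length : Int)) ∧
    (((solutionScan sl).1.length : Int) = (altFold sl).1) ∧
    ((solutionScan sl).2.foldl (fun y l => solutionInner l (solutionScan sl).1 y) 0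
      = (altFold sl).2) := by
  induction sl using List.reverseRecOn with
  | nil =>
    refine ⟨by simp [solutionScan], by simp [solutionScan], ?_, ?_⟩ <;>
      simp [solutionScan, altFold, PySem.List.pyRange_one_eq_nil]
  | append_singleton sl c ih =>
    obtain ⟨hR, hL, hlen, hy⟩ := ih
    have hscan := solutionScan_snoc sl c
    have haf : altFold (sl ++ [c]) =
        (if c = '>' then ((altFold sl).1 + 1, (altFold sl).2)
         else if c = '<' then ((altFold sl).1, (altFold sl).2 + 2 * (altFold sl).1)
         else altFold sl) := by
      simp [altFold, List.foldl_append]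
    have hlen' : ((sl ++ [c]).length : Int) = (sl.length : Int) + 1 := by simp
    refine ⟨?_, ?_, ?_, ?_⟩
    · intro x hx
      rw [hscan] at hx
      simp only [List.mem_append] at hx
      rcases hx with hx | hx
      · have := hR x hx; omega
      · split_ifs at hx <;> simp at hx <;> omega
    · intro x hx
      rw [hscan] at hx
      simp only [List.mem_append] at hx
      rcases hx with hx | hx
      · have := hL x hx; omega
      · split_ifs at hx <;> simp at hx <;> omega
    · rw [hscan, haf]
      split_ifs <;> simp [hlen]
    · rw [hscan, haf]
      by_cases hgt : c = '>'
      · subst hgt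
        rw [if_pos rfl, if_pos rfl, if_neg (by decide : ¬('>' : Char) = '<'), List.append_nil]
        rw [PySem.List.foldl_congr_mem ((solutionScan sl).2)
              (fun y l => solutionInner l ((solutionScan sl).1 ++ [(sl.length : Int)]) y)
              (fun y l => solutionInner l (solutionScan sl).1 y) 0
              (fun acc x hx => solutionInner_append_gt _ _ _ _ (hL x hx))]
        exact hy
      · by_cases hlt : c = '<'
        · subst hlt
          rw [if_neg hgt, if_neg hgt, if_pos rfl, if_pos rfl, List.append_nil,
              List.foldl_append]
          simp only [List.foldl_cons, List.foldl_nil]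
          rw [hy, solutionInner_all_lt _ _ _ hR, hlen]
        · rw [if_neg hgt, if_neg hgt, if_neg hlt, if_neg hlt, List.append_nil,
              List.append_nil]
          exact hy

-- ===== VERDICT (by name: the statement is the Claim_ definition above) =====
theorem solution_spec : Claim_equal_solution := by
  intro s _
  unfold Spec_solution solution solution_alt
  exact (scan_invariant s.toList).2.2.2
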